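-- pv_equiv track=rewrite | github.com/MehdiAbbanaBennani/continual-learning-ogdplus | scripts/gen_cl_ablation.py | gen_permutations
-- ===== SOURCE A (Python) =====
-- def gen_command(command_dict, prefix_list):
--     command_list = prefix_list.copy()
--     for key, val in command_dict.items():
--         if isinstance(val, bool):
--             if val == True:
--                 command_list.append(f"--{key}")
--         else:
--             command_list.append(f"--{key} {val}")
--     return " ".join(command_list)
--
-- def gen_permutations(grid_dict, prefix_list, header_list):
--     for key, val in grid_dict.items():
--         if not isinstance(val, list):
--             grid_dict[key] = [val]
--
--     import itertools
--     keys, values = zip(*grid_dict.items())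
--     dicts_list = [dict(zip(keys, v)) for v in itertools.product(*values)]
--
--     commands_list = [gen_command(command_dict=command_dict, prefix_list=prefix_list) for command_dict in dicts_list]
--     commands_list = header_list + commands_list
--     return commands_list
-- ===== SOURCE B (Python) =====
-- def gen_permutations(grid_dict, prefix_list, header_list):
--     # reproduce A's in-place normalization side effect
--     for key, val in grid_dict.items():
--         if not isinstance(val, list):
--             grid_dict[key] = [val]
--     # iterative Cartesian product with an accumulator of partial command token lists
--     partials = [prefix_list.copy()]
--     for key, values in grid_dict.items():
--         new_partials = []
--         for p in partials:
--             for val in values: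
--                 if isinstance(val, bool):
--                     new_partials.append(p + [f"--{key}"] if val else p + [])
--                 else:
--                     new_partials.append(p + [f"--{key} {val}"])
--         partials = new_partials
--     return header_list + [" ".join(p) for p in partials]
-- ===== Notes on version B (the rewrite author's own statement) =====
-- stated objective: alternative
-- what changed: B replaces itertools.product + per-combination dict reconstruction + a separate gen_command join pass with a single accumulator loop that extends partial token lists key by key, formatting each token inline.
import Mathlib
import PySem

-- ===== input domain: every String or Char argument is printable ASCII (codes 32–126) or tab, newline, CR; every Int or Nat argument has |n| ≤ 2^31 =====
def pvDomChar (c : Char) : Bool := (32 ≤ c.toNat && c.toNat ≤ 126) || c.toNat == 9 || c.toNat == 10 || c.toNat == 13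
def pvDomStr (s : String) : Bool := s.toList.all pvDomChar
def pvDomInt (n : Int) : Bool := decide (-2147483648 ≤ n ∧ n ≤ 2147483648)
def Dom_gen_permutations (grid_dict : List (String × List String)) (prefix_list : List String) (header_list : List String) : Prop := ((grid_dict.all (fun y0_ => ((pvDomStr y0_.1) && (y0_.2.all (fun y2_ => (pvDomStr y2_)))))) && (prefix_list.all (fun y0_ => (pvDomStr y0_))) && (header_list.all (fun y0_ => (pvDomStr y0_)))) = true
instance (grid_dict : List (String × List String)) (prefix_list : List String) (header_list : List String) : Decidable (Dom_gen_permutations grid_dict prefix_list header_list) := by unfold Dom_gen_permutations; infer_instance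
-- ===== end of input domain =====

-- B rebuilds the Cartesian product with an accumulator of partial token lists instead of
-- itertools.product + per-combination dicts + a separate gen_command pass (objective: alternative).
-- Note: the typed inputs carry List String values, so A's bool branch and its in-place
-- normalization loop (grid_dict[key] = [val] for non-list val) are no-ops here; A's Python
-- mutates grid_dict in place on non-list values, B reproduces that side effect in Python.

-- ===== PORT A =====
-- itertools.product(*values): leftmost list varies slowest
def pvProdA : List (List String) → List (List String)
  | [] => [[]]
  | vs :: rest => vs.flatMap (fun v => (pvProdA rest).map (fun t => v :: t))

-- gen_command: copy prefix_list, append "--key val" per item, join with " "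
def pvGenCommand (command_dict : List (String × String)) (prefix_list : List String) : String :=
  PySem.Str.join " " (command_dict.foldl (fun acc kv => acc ++ ["--" ++ kv.1 ++ " " ++ kv.2]) prefix_list)

def gen_permutations (grid_dict : List (String × List String)) (prefix_list : List String) (header_list : List String) : List String :=
  -- normalization loop: every value is already a list under the typing, no-op
  let keys := grid_dict.map Prod.fst
  let values := grid_dict.map Prod.snd
  -- dict(zip(keys, v)): exact as keys.zip v under Pre_ (keys are distinct, as in any Python dict)
  let dicts_list := (pvProdA values).map (fun combo => keys.zip combo)
  let commands_list := dicts_list.map (fun d => pvGenCommand d prefix_list)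
  header_list ++ commands_list

-- ===== PORT B =====
def gen_permutations_alt (grid_dict : List (String × List String)) (prefix_list : List String) (header_list : List String) : List String :=
  let partials := grid_dict.foldl
    (fun ps kv => ps.flatMap (fun p => kv.2.map (fun v => p ++ ["--" ++ kv.1 ++ " " ++ v]))) [prefix_list]
  header_list ++ partials.map (PySem.Str.join " ")

-- ===== PRECONDITION & SPEC =====
-- Pre_ excludes the empty grid_dict, on which A raises ValueError (zip(*[]) unpacking), and
-- duplicate keys, which cannot occur in a Python dict (the assoc list mirrors a dict).
def Pre_gen_permutations (grid_dict : List (String × List String)) (prefix_list : List String) (header_list : List String) : Prop :=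
  grid_dict ≠ [] ∧ (grid_dict.map Prod.fst).Nodup
instance (grid_dict : List (String × List String)) (prefix_list : List String) (header_list : List String) : Decidable (Pre_gen_permutations grid_dict prefix_list header_list) := by unfold Pre_gen_permutations; infer_instance
def pvWitness_gen_permutations : (List (String × List String)) × List String × List String :=
  ([("a", ["1", "2"]), ("b", ["x"])], ["py", "run"], ["hdr"])

def Spec_gen_permutations (grid_dict : List (String × List String)) (prefix_list : List String) (header_list : List String) (out : List String) : Prop := out = gen_permutations_alt grid_dict prefix_list header_list
instance (grid_dict : List (String × List String)) (prefix_list : List String) (header_list : List String) (out : List String) : Decidable (Spec_gen_permutations grid_dict prefix_list header_list out) := by unfold Spec_gen_permutations; infer_instance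

-- ===== CLAIM (what is proved, stated in full; the proofs are below) =====
def Claim_equal_gen_permutations : Prop := ∀ (grid_dict : List (String × List String)) (prefix_list : List String) (header_list : List String), Dom_gen_permutations grid_dict prefix_list header_list → Pre_gen_permutations grid_dict prefix_list header_list → Spec_gen_permutations grid_dict prefix_list header_list (gen_permutations grid_dict prefix_list header_list)

-- ===== LEMMAS AND PROOFS =====

theorem foldl_append_map {α β : Type} (f : α → β) :
    ∀ (l : List α) (init : List β),
      l.foldl (fun acc x => acc ++ [f x]) init = init ++ l.map f := by
  intro l
  induction l with
  | nil => simp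
  | cons x xs ih => intro init; simp [List.foldl_cons, ih]

def pvFmt (k v : String) : String := "--" ++ k ++ " " ++ v

theorem foldl_step_eq (entries : List (String × List String)) :
    ∀ (ps : List (List String)),
      entries.foldl
        (fun ps kv => ps.flatMap (fun p => kv.2.map (fun v => p ++ ["--" ++ kv.1 ++ " " ++ v]))) ps
      = ps.flatMap (fun p =>
          (pvProdA (entries.map Prod.snd)).map
            (fun combo => p ++ ((entries.map Prod.fst).zip combo).map (fun kv => pvFmt kv.1 kv.2))) := by
  induction entries with
  | nil => intro ps; simp [pvProdA]
  | cons kv rest ih =>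
      intro ps
      simp only [List.foldl_cons, ih, pvProdA, List.map_cons]
      simp [List.flatMap_map, List.map_flatMap, List.flatMap_assoc, List.map_map,
        Function.comp_def, pvFmt, List.append_assoc]

theorem gen_permutations_spec : Claim_equal_gen_permutations := by
  intro grid prefix_list header_list _ _
  unfold Spec_gen_permutations gen_permutations gen_permutations_alt
  rw [foldl_step_eq]
  simp only [List.flatMap_cons, List.flatMap_nil, List.append_nil, List.map_map]
  refine congrArg (header_list ++ ·) ?_
  refine List.map_congr_left ?_
  intro combo _
  show pvGenCommand ((grid.map Prod.fst).zip combo) prefix_list = _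
  unfold pvGenCommand
  rw [foldl_append_map (fun kv : String × String => "--" ++ kv.1 ++ " " ++ kv.2)]
  simp [pvFmt]
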